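-- pv_equiv track=rewrite | github.com/jason6842/CodePath | Breakout Problems Session 4/StandardProblemSetV1.py | num_equiv_species_pairs
-- ===== SOURCE A (Python) =====
-- def num_equiv_species_pairs(species_pair):
--     for pair in species_pair:
--         pair.sort()
--
--     species_dct = {}
--     for pair in species_pair:
--         if tuple(pair) not in species_dct:
--             species_dct[tuple(pair)] = 1
--         else:
--             species_dct[tuple(pair)] += 1
--
--     res = 0
--     for value in species_dct.values():
--         res += value * (value - 1) // 2
--     return res
-- ===== SOURCE B (Python) =====
-- def num_equiv_species_pairs(species_pair):
--     # Same in-place sort of each pair as the original (mutation preserved).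
--     for pair in species_pair:
--         pair.sort()
--
--     # Single pass: each repeated key contributes the number of equal keys
--     # already seen, so no second pass over tallies is needed.
--     seen = {}
--     res = 0
--     for pair in species_pair:
--         key = tuple(pair)
--         res += seen.get(key, 0)
--         seen[key] = seen.get(key, 0) + 1
--     return res
-- ===== Notes on version B (the rewrite author's own statement) =====
-- stated objective: alternative
-- what changed: Instead of building a full count dict and then summing v*(v-1)//2 over its values in a second pass, B accumulates the answer on the fly: each pair adds the number of identical sorted pairs already seen, so the closed-form-per-group pass disappears.
import Mathlib
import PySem

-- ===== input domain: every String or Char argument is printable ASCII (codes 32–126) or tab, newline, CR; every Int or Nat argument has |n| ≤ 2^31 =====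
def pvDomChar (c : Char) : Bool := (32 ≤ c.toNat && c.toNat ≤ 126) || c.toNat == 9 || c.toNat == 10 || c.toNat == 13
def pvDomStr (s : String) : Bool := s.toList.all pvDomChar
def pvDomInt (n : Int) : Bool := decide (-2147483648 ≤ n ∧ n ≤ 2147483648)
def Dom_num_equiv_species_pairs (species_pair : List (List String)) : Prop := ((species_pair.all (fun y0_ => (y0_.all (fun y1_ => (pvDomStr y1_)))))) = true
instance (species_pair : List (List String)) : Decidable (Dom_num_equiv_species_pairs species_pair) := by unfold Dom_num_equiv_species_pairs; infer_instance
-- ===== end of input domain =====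

-- B accumulates the pair count in one dict pass (res += count seen so far) instead of tallying group sizes and summing v*(v-1)//2; return-value equivalence only stated, though both also perform the same in-place sort of each inner list.


-- ===== PORT A =====
def num_equiv_species_pairs (species_pair : List (List String)) : Int :=
  -- for pair in species_pair: pair.sort()
  let sortedPairs := species_pair.map (fun pair => PySem.List.sorted pair (fun x => x) false)
  -- species_dct = {}; for pair in ...: if tuple(pair) not in dct: dct[k]=1 else dct[k]+=1
  let species_dct := sortedPairs.foldl
    (fun (d : PySem.Dict (List String) Int) pair =>
      if d.contains pair = false then d.insert pair 1 else d.modify pair 0 (· + 1))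
    PySem.Dict.empty
  -- res = 0; for value in dct.values(): res += value * (value - 1) // 2
  species_dct.values.foldl (fun res v => res + PySem.Int.floordiv (v * (v - 1)) 2) 0

-- ===== PORT B =====
def num_equiv_species_pairs_alt (species_pair : List (List String)) : Int :=
  -- same in-place sort of each pair
  let sortedPairs := species_pair.map (fun pair => PySem.List.sorted pair (fun x => x) false)
  -- seen = {}; res = 0; for pair: res += seen.get(k,0); seen[k] = seen.get(k,0)+1
  let st := sortedPairs.foldl
    (fun (st : PySem.Dict (List String) Int × Int) key =>
      (st.1.insert key (st.1.getD key 0 + 1), st.2 + st.1.getD key 0))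
    (PySem.Dict.empty, 0)
  st.2

-- ===== PRECONDITION & SPEC =====
def Spec_num_equiv_species_pairs (species_pair : List (List String)) (out : Int) : Prop := out = num_equiv_species_pairs_alt species_pair
instance (species_pair : List (List String)) (out : Int) : Decidable (Spec_num_equiv_species_pairs species_pair out) := by unfold Spec_num_equiv_species_pairs; infer_instance

-- ===== CLAIM (what is proved, stated in full; the proofs are below) =====
def Claim_equal_num_equiv_species_pairs : Prop := ∀ (species_pair : List (List String)), Dom_num_equiv_species_pairs species_pair → Spec_num_equiv_species_pairs species_pair (num_equiv_species_pairs species_pair)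

-- ===== LEMMAS AND PROOFS =====


-- pair chooser f v = v*(v-1)//2 and the per-dict total G
def pvF (v : Int) : Int := PySem.Int.floordiv (v * (v - 1)) 2

def pvG (d : PySem.Dict (List String) Int) : Int := (d.values.map pvF).sum

-- (c+1)*c//2 = c*(c-1)//2 + c
theorem pvF_step (c : Int) : pvF (c + 1) = pvF c + c := by
  unfold pvF PySem.Int.floordiv
  have h : (c + 1) * ((c + 1) - 1) = c * (c - 1) + c * 2 := by ring
  rw [h, Int.add_mul_fdiv_right _ _ (by norm_num : (2:Int) ≠ 0)]

-- sum of a map over a Nodup list when the function changes at one member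
theorem pvSum_update {α : Type} [DecidableEq α] (l : List α) (hnd : l.Nodup)
    (x : α) (hx : x ∈ l) (g g' : α → Int)
    (hoff : ∀ y ∈ l, y ≠ x → g' y = g y) :
    (l.map g').sum = (l.map g).sum + (g' x - g x) := by
  induction l with
  | nil => cases hx
  | cons a t ih =>
    simp only [List.map_cons, List.sum_cons]
    rcases List.mem_cons.mp hx with h | h
    · subst h
      have : ∀ y ∈ t, g' y = g y := by
        intro y hy
        exact hoff y (List.mem_cons_of_mem _ hy) (fun he => (List.nodup_cons.mp hnd).1 (he ▸ hy))
      rw [List.map_congr_left this]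
      ring
    · have hax : a ≠ x := fun he => (List.nodup_cons.mp hnd).1 (he ▸ h)
      rw [hoff a (List.mem_cons_self) hax,
        ih (List.nodup_cons.mp hnd).2 h (fun y hy hne => hoff y (List.mem_cons_of_mem _ hy) hne)]
      ring

-- G after one counting insert grows by the old count
theorem pvG_insert (d : PySem.Dict (List String) Int) (hnd : d.keys.Nodup) (x : List String) :
    pvG (d.insert x (d.getD x 0 + 1)) = pvG d + d.getD x 0 := by
  by_cases hc : d.contains x = true
  · unfold pvG
    rw [PySem.Dict.values_eq_map_keys _ (by simpa [PySem.Dict.keys_insert_of_contains d _ hc]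
          using hnd) 0,
      PySem.Dict.keys_insert_of_contains d _ hc,
      PySem.Dict.values_eq_map_keys _ hnd 0, List.map_map, List.map_map]
    simp only [Function.comp_def]
    have hx : x ∈ d.keys := (PySem.Dict.contains_iff_mem_keys d x).mp hc
    rw [pvSum_update d.keys hnd x hx (fun k => pvF (d.getD k 0))
        (fun k => pvF ((d.insert x (d.getD x 0 + 1)).getD k 0))
        (by intro y _ hy; simp [PySem.Dict.getD_insert, hy])]
    simp [pvF_step]
  · have hc' : d.contains x = false := by simpa using hc
    have hget : d.getD x 0 = 0 := PySem.Dict.getD_of_not_contains d 0 hc'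
    have hxmem : x ∉ d.keys := fun hm => by
      simp [(PySem.Dict.contains_iff_mem_keys d x).mpr hm] at hc'
    have hk : (d.insert x (d.getD x 0 + 1)).keys = d.keys ++ [x] :=
      PySem.Dict.keys_insert_of_not_contains d _ hc'
    have hnd' : (d.insert x (d.getD x 0 + 1)).keys.Nodup :=
      PySem.Dict.nodup_keys_insert d x _ hnd
    unfold pvG
    rw [PySem.Dict.values_eq_map_keys _ hnd' 0, hk,
      PySem.Dict.values_eq_map_keys _ hnd 0]
    simp only [List.map_map, Function.comp_def, List.map_append, List.sum_append]
    have hmap : List.map (fun k => pvF ((d.insert x (d.getD x 0 + 1)).getD k 0)) d.keys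
        = List.map (fun k => pvF (d.getD k 0)) d.keys := by
      apply List.map_congr_left
      intro y hy
      have hyx : y ≠ x := fun he => hxmem (he ▸ hy)
      simp [PySem.Dict.getD_insert, hyx]
    rw [hmap]
    norm_num [PySem.Dict.getD_insert, hget, pvF, PySem.Int.floordiv]

-- the counting-insert step, shared by both loops
def pvStep (d : PySem.Dict (List String) Int) (x : List String) :
    PySem.Dict (List String) Int := d.insert x (d.getD x 0 + 1)

theorem pvA_step_eq (d : PySem.Dict (List String) Int) (x : List String) :
    (if d.contains x = false then d.insert x 1 else d.modify x 0 (· + 1)) = pvStep d x := by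
  unfold pvStep PySem.Dict.modify
  split
  · rename_i h
    rw [PySem.Dict.getD_of_not_contains d 0 h]
    norm_num
  · rfl

theorem pvNodup_step (d : PySem.Dict (List String) Int) (hnd : d.keys.Nodup) (x : List String) :
    (pvStep d x).keys.Nodup := PySem.Dict.nodup_keys_insert d x _ hnd

-- B's fold tracks A's dict and carries G's increase as its running result
theorem pvB_invariant (xs : List (List String)) :
    ∀ (d : PySem.Dict (List String) Int) (r : Int), d.keys.Nodup →
    xs.foldl (fun (st : PySem.Dict (List String) Int × Int) key =>
        (st.1.insert key (st.1.getD key 0 + 1), st.2 + st.1.getD key 0)) (d, r)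
      = (xs.foldl pvStep d, r + pvG (xs.foldl pvStep d) - pvG d) := by
  induction xs with
  | nil => intro d r _; simp
  | cons x t ih =>
    intro d r hnd
    simp only [List.foldl_cons]
    rw [show (d.insert x (d.getD x 0 + 1), r + d.getD x 0)
        = (pvStep d x, r + d.getD x 0) from rfl,
      ih (pvStep d x) (r + d.getD x 0) (pvNodup_step d hnd x)]
    have h := pvG_insert d hnd x
    unfold pvStep
    rw [Prod.mk.injEq]
    exact ⟨rfl, by rw [h]; ring⟩

-- ===== VERDICT (by name: the statement is the Claim_ definition above) =====
theorem num_equiv_species_pairs_spec : Claim_equal_num_equiv_species_pairs := by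
  intro species_pair _
  unfold Spec_num_equiv_species_pairs num_equiv_species_pairs num_equiv_species_pairs_alt
  simp only
  set xs := species_pair.map (fun pair => PySem.List.sorted pair (fun x => x) false) with hxs
  have hA : xs.foldl
      (fun (d : PySem.Dict (List String) Int) pair =>
        if d.contains pair = false then d.insert pair 1 else d.modify pair 0 (· + 1))
      PySem.Dict.empty = xs.foldl pvStep PySem.Dict.empty := by
    apply PySem.List.foldl_congr_mem
    intro d y _; exact pvA_step_eq d y
  rw [hA, pvB_invariant xs PySem.Dict.empty 0 (by simp [PySem.Dict.keys_empty])]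
  simp only
  rw [PySem.List.foldl_add]
  have hGe : pvG PySem.Dict.empty = 0 := by simp [pvG, PySem.Dict.values]; rfl
  rw [hGe]
  unfold pvG pvF
  ring
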